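-- pv_equiv track=rewrite | github.com/ksh1004/codetree-TILs | 250422/숫자 2배 후 하나 제거하기/multiply-two-and-remove-one-number.py | find_min_diff_after_double_and_remove
-- ===== SOURCE A (Python) =====
-- from typing import List
--
-- def compute_adjacent_diff_sum(numbers: List[int]) -> int:
--     """리스트 내 인접한 수들의 차이의 합을 계산"""
--     return sum(abs(numbers[i] - numbers[i - 1]) for i in range(1, len(numbers)))
--
-- def find_min_diff_after_double_and_remove(numbers: List[int]) -> int:
--     """하나를 두 배로 만들고, 또 다른 하나를 제거했을 때 인접 차이 합의 최솟값 계산"""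
--     n = len(numbers)
--     min_total = float('inf')
--
--     for i in range(n):
--         numbers[i] *= 2  # i번째 원소를 두 배로
--         for j in range(n):
--             if i == j:
--                 continue  # 같은 원소를 두 배 후 제거하지 않음
--             temp_list = [numbers[k] for k in range(n) if k != j]  # j번째 원소 제거
--             diff_sum = compute_adjacent_diff_sum(temp_list)
--             min_total = min(min_total, diff_sum)
--         numbers[i] //= 2  # 원상 복구
--
--     return min_total
-- ===== SOURCE B (Python) =====
-- from typing import List
--
-- def find_min_diff_after_double_and_remove(numbers: List[int]) -> int:
--     n = len(numbers)
--     best = None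
--     for i in range(n):
--         m = list(numbers)
--         m[i] *= 2
--         diffs = [abs(m[k + 1] - m[k]) for k in range(n - 1)]
--         S = sum(diffs)
--         for j in range(n):
--             if j == i:
--                 continue
--             if j == 0:
--                 cand = S - diffs[0]
--             elif j == n - 1:
--                 cand = S - diffs[n - 2]
--             else:
--                 cand = S - diffs[j - 1] - diffs[j] + abs(m[j + 1] - m[j - 1])
--             if best is None or cand < best:
--                 best = cand
--     return 0 if best is None else best
-- ===== Notes on version B (the rewrite author's own statement) =====
-- stated objective: faster
-- what changed: Per doubled index i, B precomputes the adjacent-difference array and its sum once, then gets each removal's new diff-sum by an O(1) endpoint/bridge update instead of A's rebuilding the list without j and re-summing all adjacent differences for every (i,j) pair.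
-- outside the precondition, e.g. on find_min_diff_after_double_and_remove([5]): A returns inf, B returns 0; on find_min_diff_after_double_and_remove([]): A returns inf, B returns 0
import Mathlib
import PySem

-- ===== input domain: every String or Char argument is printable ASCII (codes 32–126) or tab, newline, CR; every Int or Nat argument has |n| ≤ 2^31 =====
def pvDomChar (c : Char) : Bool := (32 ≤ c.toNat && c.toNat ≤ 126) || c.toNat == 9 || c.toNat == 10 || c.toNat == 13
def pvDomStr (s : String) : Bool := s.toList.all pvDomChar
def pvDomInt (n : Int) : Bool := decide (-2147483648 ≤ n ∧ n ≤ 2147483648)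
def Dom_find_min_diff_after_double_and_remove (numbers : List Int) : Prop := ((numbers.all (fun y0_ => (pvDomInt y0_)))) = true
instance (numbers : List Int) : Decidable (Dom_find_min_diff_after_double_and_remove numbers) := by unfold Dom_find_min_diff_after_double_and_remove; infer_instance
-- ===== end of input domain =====

-- B replaces A's per-(i,j) rebuild-and-rescan (copy the list without j, re-sum all adjacent differences)
-- by a per-i precomputed adjacent-difference array with an O(1) endpoint-update per removal (O(n^2) vs O(n^3)).
-- Python A temporarily doubles numbers[i] in place and restores it exactly (integer //2), so there is no net mutation.

-- ===== PORT A =====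
def compute_adjacent_diff_sum (xs : List Int) : Int :=
  (PySem.List.pyRange 1 xs.length 1).foldl
    (fun acc i => acc + |PySem.List.pyGetD xs i 0 - PySem.List.pyGetD xs (i - 1) 0|) 0

-- min_total starts as float('inf'): modelled as `none`; the final `.getD 0` is unreachable under Pre_
-- (for n ≥ 2 the min is updated at least once; for n < 2 Python returns the float inf, excluded by Pre_).
def find_min_diff_after_double_and_remove (numbers : List Int) : Int :=
  let n := numbers.length
  let min_total :=
    (List.range n).foldl (fun acc i =>
      let m := numbers.set i (2 * numbers.getD i 0)   -- numbers[i] *= 2 (restored afterwards in Python)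
      (List.range n).foldl (fun acc2 j =>
        if i = j then acc2
        else
          let temp_list := ((List.range n).filter (fun k => k ≠ j)).map (fun k => m.getD k 0)
          let diff_sum := compute_adjacent_diff_sum temp_list
          match acc2 with
          | none => some diff_sum
          | some v => some (min v diff_sum)) acc) none
  min_total.getD 0

-- ===== PORT B =====
def find_min_diff_after_double_and_remove_alt (numbers : List Int) : Int :=
  let n := numbers.length
  let best :=
    (List.range n).foldl (fun best i =>
      let m := numbers.set i (2 * numbers.getD i 0)
      let diffs := (List.range (n - 1)).map (fun k => |m.getD (k + 1) 0 - m.getD k 0|)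
      let S := diffs.sum
      (List.range n).foldl (fun b j =>
        if j = i then b
        else
          let cand :=
            if j = 0 then S - diffs.getD 0 0
            else if j = n - 1 then S - diffs.getD (n - 2) 0
            else S - diffs.getD (j - 1) 0 - diffs.getD j 0 + |m.getD (j + 1) 0 - m.getD (j - 1) 0|
          match b with
          | none => some cand
          | some a => if cand < a then some cand else some a) best) none
  best.getD 0

-- ===== PRECONDITION & SPEC =====
-- Pre_ excludes lists of fewer than 2 elements: there A's min is never updated and Python returns
-- the float('inf') sentinel, which is not a value of the declared int return type.
def Pre_find_min_diff_after_double_and_remove (numbers : List Int) : Prop := 2 ≤ numbers.length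
instance (numbers : List Int) : Decidable (Pre_find_min_diff_after_double_and_remove numbers) := by
  unfold Pre_find_min_diff_after_double_and_remove; infer_instance
def pvWitness_find_min_diff_after_double_and_remove : List Int := [3, 1, 2]

def Spec_find_min_diff_after_double_and_remove (numbers : List Int) (out : Int) : Prop := out = find_min_diff_after_double_and_remove_alt numbers
instance (numbers : List Int) (out : Int) : Decidable (Spec_find_min_diff_after_double_and_remove numbers out) := by unfold Spec_find_min_diff_after_double_and_remove; infer_instance

-- ===== CLAIM (what is proved, stated in full; the proofs are below) =====
def Claim_equal_find_min_diff_after_double_and_remove : Prop := ∀ (numbers : List Int), Dom_find_min_diff_after_double_and_remove numbers → Pre_find_min_diff_after_double_and_remove numbers → Spec_find_min_diff_after_double_and_remove numbers (find_min_diff_after_double_and_remove numbers)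

-- ===== LEMMAS AND PROOFS =====

/-- Sum of adjacent absolute differences, structurally. -/
def adjDiff : List Int → Int
  | a :: b :: t => |b - a| + adjDiff (b :: t)
  | _ => 0

theorem adjDiff_cons (x : Int) (l : List Int) (h : l ≠ []) :
    adjDiff (x :: l) = |l.getD 0 0 - x| + adjDiff l := by
  cases l with
  | nil => exact absurd rfl h
  | cons b t => simp [adjDiff]

theorem map_getD_self (t : List Int) :
    (List.range t.length).map (fun k => t.getD k 0) = t := by
  induction t with
  | nil => simp
  | cons x t ih =>
    simp only [List.length_cons, List.range_succ_eq_map, List.map_cons, List.map_map]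
    simpa using ih

theorem temp_eq_erase (m : List Int) (j : Nat) :
    ((List.range m.length).filter (fun k => k ≠ j)).map (fun k => m.getD k 0) = m.eraseIdx j := by
  induction m generalizing j with
  | nil => simp
  | cons x t ih =>
    cases j with
    | zero =>
      simp only [List.length_cons, List.range_succ_eq_map, List.filter_cons, decide_eq_true_eq]
      rw [if_neg (by simp)]
      rw [List.filter_map, List.map_map]
      have h1 : (List.filter ((fun k => decide (k ≠ 0)) ∘ Nat.succ) (List.range t.length)) = List.range t.length := by
        apply List.filter_eq_self.2; intro a _; simp
      rw [h1, List.eraseIdx_zero, List.tail_cons]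
      have h2 : (fun k => (x :: t).getD k 0) ∘ Nat.succ = fun k => t.getD k 0 := by
        funext k; simp
      rw [h2, map_getD_self]
    | succ j' =>
      simp only [List.length_cons, List.range_succ_eq_map, List.filter_cons, decide_eq_true_eq]
      rw [if_pos (by simp)]
      rw [List.filter_map, List.map_cons, List.map_map]
      have h1 : (List.filter ((fun k => decide (k ≠ j' + 1)) ∘ Nat.succ) (List.range t.length)) = List.filter (fun k => decide (k ≠ j')) (List.range t.length) := by
        apply List.filter_congr; intro a _; simp
      rw [h1, List.eraseIdx_cons_succ]
      have h2 : (fun k => (x :: t).getD k 0) ∘ Nat.succ = fun k => t.getD k 0 := by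
        funext k; simp
      rw [h2, ih j']
      simp

theorem sum_range_eq_adjDiff (xs : List Int) :
    ((List.range (xs.length - 1)).map (fun k => |xs.getD (k + 1) 0 - xs.getD k 0|)).sum = adjDiff xs := by
  induction xs with
  | nil => simp [adjDiff]
  | cons x t ih =>
    cases t with
    | nil => simp [adjDiff]
    | cons y t' =>
      simp only [List.length_cons, Nat.add_sub_cancel] at *
      rw [List.range_succ_eq_map, List.map_cons, List.map_map, List.sum_cons]
      have h2 : ((fun k => |(x :: y :: t').getD (k + 1) 0 - (x :: y :: t').getD k 0|) ∘ Nat.succ)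
          = fun k => |(y :: t').getD (k + 1) 0 - (y :: t').getD k 0| := by
        funext k; simp
      rw [h2, ih]
      simp [adjDiff]

theorem compute_eq_adjDiff (xs : List Int) :
    compute_adjacent_diff_sum xs = adjDiff xs := by
  unfold compute_adjacent_diff_sum
  rw [PySem.List.pyRange_one, List.foldl_map, PySem.List.foldl_add]
  have hn : ((xs.length : Int) - 1).toNat = xs.length - 1 := by omega
  rw [hn, ← sum_range_eq_adjDiff]
  rw [zero_add]
  congr 1
  apply List.map_congr_left
  intro k _
  have e1 : (1 : Int) + k = ((k + 1 : Nat) : Int) := by push_cast; ring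
  have e3 : ((k + 1 : Nat) : Int) - 1 = ((k : Nat) : Int) := by push_cast; ring
  simp only [e1, e3, PySem.List.pyGetD_natCast]

theorem getD_erase_head (t : List Int) (j : Nat) (hj : 1 ≤ j) :
    (t.eraseIdx j).getD 0 0 = t.getD 0 0 := by
  cases t with
  | nil => simp
  | cons a t' =>
    cases j with
    | zero => omega
    | succ j' => simp

theorem erase_zero (m : List Int) (h2 : 2 ≤ m.length) :
    adjDiff (m.eraseIdx 0) = adjDiff m - |m.getD 1 0 - m.getD 0 0| := by
  match m, h2 with
  | a :: b :: t, _ => simp [adjDiff]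

theorem erase_last (m : List Int) (j : Nat) (hj : 1 ≤ j) (hlast : j = m.length - 1) :
    adjDiff (m.eraseIdx j) = adjDiff m - |m.getD j 0 - m.getD (j - 1) 0| := by
  induction m generalizing j with
  | nil => simp at hlast; omega
  | cons x t ih =>
    match j, hj with
    | 1, _ =>
      match t, hlast with
      | [b], _ => simp [adjDiff]
    | (j' + 2), _ =>
      have hne : t ≠ [] := by
        intro h; subst h; simp at hlast
      have hlen : j' + 1 = t.length - 1 := by
        simp at hlast; omega
      have hne2 : t.eraseIdx (j' + 1) ≠ [] := by
        intro h
        have := List.length_eraseIdx_of_lt (l := t) (i := j' + 1) (by omega)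
        rw [h] at this; simp at this; omega
      rw [List.eraseIdx_cons_succ, adjDiff_cons x _ hne2, adjDiff_cons x t hne,
        getD_erase_head t (j' + 1) (by omega), ih (j' + 1) (by omega) hlen]
      have g1 : (x :: t).getD (j' + 2) 0 = t.getD (j' + 1) 0 := by simp
      have g2 : (x :: t).getD (j' + 1) 0 = t.getD j' 0 := by simp
      rw [g1]
      have g3 : (j' + 2 - 1) = j' + 1 := by omega
      rw [g3, g2]
      have g4 : (j' + 1 - 1) = j' := by omega
      rw [g4]
      ring

theorem erase_mid (m : List Int) (j : Nat) (hj : 1 ≤ j) (hj2 : j + 1 < m.length) :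
    adjDiff (m.eraseIdx j) =
      adjDiff m - |m.getD j 0 - m.getD (j - 1) 0| - |m.getD (j + 1) 0 - m.getD j 0|
        + |m.getD (j + 1) 0 - m.getD (j - 1) 0| := by
  induction m generalizing j with
  | nil => simp at hj2
  | cons x t ih =>
    match j, hj with
    | 1, _ =>
      match t, hj2 with
      | b :: c :: t', _ => simp [adjDiff]; ring
    | (j' + 2), _ =>
      have hne : t ≠ [] := by intro h; subst h; simp at hj2
      have hlen : (j' + 1) + 1 < t.length := by simp at hj2; omega
      have hne2 : t.eraseIdx (j' + 1) ≠ [] := by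
        intro h
        have := List.length_eraseIdx_of_lt (l := t) (i := j' + 1) (by omega)
        rw [h] at this; simp at this; omega
      rw [List.eraseIdx_cons_succ, adjDiff_cons x _ hne2, adjDiff_cons x t hne,
        getD_erase_head t (j' + 1) (by omega), ih (j' + 1) (by omega) hlen]
      have g1 : ∀ k, (x :: t).getD (k + 1) 0 = t.getD k 0 := by intro k; simp
      have e1 : (j' + 2 - 1) = j' + 1 := by omega
      have e2 : (j' + 1 - 1) = j' := by omega
      rw [e1, g1 (j' + 2), g1 (j' + 1), g1 j', e2]
      ring

theorem min_if (v c : Int) : min v c = if c < v then c else v := by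
  rw [min_def]; split_ifs <;> omega

/-- The candidate A computes for (m, j): rebuild the list without index j and re-sum. -/
theorem candA_eq_candB (m : List Int) (j : Nat) (hj : j < m.length) (h2 : 2 ≤ m.length) :
    compute_adjacent_diff_sum
        (((List.range m.length).filter (fun k => k ≠ j)).map (fun k => m.getD k 0)) =
      (if j = 0 then
        ((List.range (m.length - 1)).map (fun k => |m.getD (k + 1) 0 - m.getD k 0|)).sum
          - ((List.range (m.length - 1)).map (fun k => |m.getD (k + 1) 0 - m.getD k 0|)).getD 0 0
      else if j = m.length - 1 then
        ((List.range (m.length - 1)).map (fun k => |m.getD (k + 1) 0 - m.getD k 0|)).sum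
          - ((List.range (m.length - 1)).map (fun k => |m.getD (k + 1) 0 - m.getD k 0|)).getD (m.length - 2) 0
      else
        ((List.range (m.length - 1)).map (fun k => |m.getD (k + 1) 0 - m.getD k 0|)).sum
          - ((List.range (m.length - 1)).map (fun k => |m.getD (k + 1) 0 - m.getD k 0|)).getD (j - 1) 0
          - ((List.range (m.length - 1)).map (fun k => |m.getD (k + 1) 0 - m.getD k 0|)).getD j 0
          + |m.getD (j + 1) 0 - m.getD (j - 1) 0|) := by
  rw [temp_eq_erase, compute_eq_adjDiff, sum_range_eq_adjDiff]
  by_cases h0 : j = 0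
  · subst h0
    rw [if_pos rfl, PySem.List.getD_map_range _ _ _ _ (by omega)]
    exact erase_zero m h2
  · rw [if_neg h0]
    by_cases hl : j = m.length - 1
    · rw [if_pos hl, PySem.List.getD_map_range _ _ _ _ (by omega)]
      have := erase_last m j (by omega) hl
      rw [this]
      have e1 : m.length - 2 + 1 = j := by omega
      have e2 : m.length - 2 = j - 1 := by omega
      rw [e1, e2]
    · rw [if_neg hl, PySem.List.getD_map_range _ _ _ _ (by omega),
        PySem.List.getD_map_range _ _ _ _ (by omega)]
      have := erase_mid m j (by omega) (by omega)
      rw [this]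
      have e1 : j - 1 + 1 = j := by omega
      rw [e1]

-- ===== VERDICT (by name: the statement is the Claim_ definition above) =====
theorem find_min_diff_after_double_and_remove_spec : Claim_equal_find_min_diff_after_double_and_remove := by
  intro numbers _ hpre
  unfold Pre_find_min_diff_after_double_and_remove at hpre
  unfold Spec_find_min_diff_after_double_and_remove
  unfold find_min_diff_after_double_and_remove find_min_diff_after_double_and_remove_alt
  dsimp only
  congr 1
  apply PySem.List.foldl_congr_mem
  intro acc i hi
  rw [List.mem_range] at hi
  have hmlen : (numbers.set i (2 * numbers.getD i 0)).length = numbers.length := by simp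
  apply PySem.List.foldl_congr_mem
  intro acc2 j hj
  rw [List.mem_range] at hj
  by_cases hij : i = j
  · rw [if_pos hij, if_pos hij.symm]
  · rw [if_neg hij, if_neg (Ne.symm hij)]
    have key := candA_eq_candB (numbers.set i (2 * numbers.getD i 0)) j
      (by rw [hmlen]; exact hj) (by rw [hmlen]; exact hpre)
    rw [hmlen] at key
    rw [key]
    cases acc2 with
    | none => rfl
    | some v =>
      dsimp only
      rw [min_if, apply_ite some]
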